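-- pv_equiv track=rewrite | github.com/youssef-elmansy/ivolve-internship | ansible/task30/venv/lib/python3.12/site-packages/ansible_collections/azure/azcollection/plugins/modules/azure_rm_tags.py | tags_update
-- ===== SOURCE A (Python) =====
-- def tags_update(old, new):
--     old = old or dict()
--     new = new or dict()
--     merge_tag = not set(new.items()).issubset(set(old.items()))
--     replace_tag = True
--     if not merge_tag and len(old) == len(new):
--         replace_tag = False
--     delete_tag = False
--     for key, value in new.items():
--         if old.get(key) and old.get(key) == value:
--             delete_tag = True
--             break
--     return merge_tag, delete_tag, replace_tag
-- ===== SOURCE B (Python) =====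
-- def tags_update(old, new):
--     old = old or dict()
--     new = new or dict()
--     merge_tag = False
--     delete_tag = False
--     for key, value in new.items():
--         ov = old.get(key)
--         if ov != value:
--             merge_tag = True
--         elif ov:
--             delete_tag = True
--     replace_tag = merge_tag or len(old) != len(new)
--     return merge_tag, delete_tag, replace_tag
-- ===== Notes on version B (the rewrite author's own statement) =====
-- stated objective: simpler
-- what changed: One fused loop over new.items() maintains the merge and delete flags together (replace derived arithmetically from merge and the lengths), instead of A's three differently-shaped passes: a set-subset test, a length branch, and a separate break-loop.
import Mathlib
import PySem

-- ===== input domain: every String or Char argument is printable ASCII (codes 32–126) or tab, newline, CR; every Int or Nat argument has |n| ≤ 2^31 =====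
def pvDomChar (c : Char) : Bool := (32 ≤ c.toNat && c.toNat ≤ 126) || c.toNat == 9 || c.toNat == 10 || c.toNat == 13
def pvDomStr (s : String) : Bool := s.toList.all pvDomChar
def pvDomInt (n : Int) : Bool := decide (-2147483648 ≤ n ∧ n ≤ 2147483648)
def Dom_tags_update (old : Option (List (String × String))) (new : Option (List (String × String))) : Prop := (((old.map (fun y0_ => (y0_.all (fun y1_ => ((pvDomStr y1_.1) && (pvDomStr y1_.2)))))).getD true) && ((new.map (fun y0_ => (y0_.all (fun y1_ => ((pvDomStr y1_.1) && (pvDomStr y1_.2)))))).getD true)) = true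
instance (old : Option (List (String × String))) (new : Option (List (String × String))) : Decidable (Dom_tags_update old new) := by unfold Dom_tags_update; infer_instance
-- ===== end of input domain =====

-- B replaces A's three differently-shaped passes (set-subset test, length branch, break-loop)
-- by one fused loop over new.items() maintaining both flags; objective: simpler. Return values only (no mutation).

-- Shared input normalization: the Python parameter is an Optional dict; 'old = old or dict()'
-- (None and the empty dict both normalize to the empty dict, which Dict.ofList [] already is).
def pvDictArg (o : Option (List (String × String))) : PySem.Dict String String :=
  PySem.Dict.ofList (o.getD [])

-- Python truthiness of old.get(key): None and '' are falsy.
def pvTruthy (ov : Option String) : Bool :=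
  match ov with
  | none => false
  | some s => !(s == "")

-- ===== PORT A =====
-- A's 'for key, value in new.items(): if old.get(key) and old.get(key) == value: delete_tag = True; break'
def pvDeleteLoop (oldD : PySem.Dict String String) : List (String × String) → Bool
  | [] => false
  | (k, v) :: rest =>
    if pvTruthy (oldD.get? k) && (oldD.get? k == some v) then true
    else pvDeleteLoop oldD rest

def tags_update (old : Option (List (String × String))) (new : Option (List (String × String))) : Bool × Bool × Bool :=
  let oldD := pvDictArg old
  let newD := pvDictArg new
  -- merge_tag = not set(new.items()).issubset(set(old.items()))
  let merge_tag := !(newD.items.all (fun p => oldD.items.contains p))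
  -- replace_tag = True; if not merge_tag and len(old) == len(new): replace_tag = False
  let replace_tag := if !merge_tag && (oldD.size == newD.size) then false else true
  let delete_tag := pvDeleteLoop oldD newD.items
  (merge_tag, delete_tag, replace_tag)

-- ===== PORT B =====
-- B's fused loop body: ov = old.get(k); if ov != v: merge = True; elif ov: delete = True
def pvAltStep (oldD : PySem.Dict String String) (st : Bool × Bool) (p : String × String) : Bool × Bool :=
  let ov := oldD.get? p.1
  if ov != some p.2 then (true, st.2)
  else if pvTruthy ov then (st.1, true)
  else st

def tags_update_alt (old : Option (List (String × String))) (new : Option (List (String × String))) : Bool × Bool × Bool :=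
  let oldD := pvDictArg old
  let newD := pvDictArg new
  let st := newD.items.foldl (pvAltStep oldD) (false, false)
  (st.1, st.2, st.1 || !(oldD.size == newD.size))

-- ===== PRECONDITION & SPEC =====
def Spec_tags_update (old : Option (List (String × String))) (new : Option (List (String × String))) (out : Bool × Bool × Bool) : Prop := out = tags_update_alt old new
instance (old : Option (List (String × String))) (new : Option (List (String × String))) (out : Bool × Bool × Bool) : Decidable (Spec_tags_update old new out) := by unfold Spec_tags_update; infer_instance

-- ===== CLAIM (what is proved, stated in full; the proofs are below) =====
def Claim_equal_tags_update : Prop := ∀ (old : Option (List (String × String))) (new : Option (List (String × String))), Dom_tags_update old new → Spec_tags_update old new (tags_update old new)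

-- ===== LEMMAS AND PROOFS =====

-- B's fused loop, characterized: it or-accumulates one 'any' per flag.
theorem pvAltStep_foldl (D : PySem.Dict String String) (l : List (String × String)) (m d : Bool) :
    l.foldl (pvAltStep D) (m, d) =
      (m || l.any (fun p => D.get? p.1 != some p.2),
       d || l.any (fun p => pvTruthy (D.get? p.1) && (D.get? p.1 == some p.2))) := by
  induction l generalizing m d with
  | nil => simp
  | cons p rest ih =>
    obtain ⟨k, v⟩ := p
    simp only [List.foldl_cons, List.any_cons, pvAltStep, ih]
    by_cases h1 : D.get? k = some v
    · by_cases h2 : pvTruthy (some v) = true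
      · simp [h1, h2]
      · simp [h1, h2]
    · have hb : (D.get? k == some v) = false := by simp [h1]
      simp [h1, hb]

-- A's break-loop is the same 'any'.
theorem pvDeleteLoop_eq_any (D : PySem.Dict String String) (l : List (String × String)) :
    pvDeleteLoop D l = l.any (fun p => pvTruthy (D.get? p.1) && (D.get? p.1 == some p.2)) := by
  induction l with
  | nil => rfl
  | cons p rest ih =>
    obtain ⟨k, v⟩ := p
    simp only [pvDeleteLoop, List.any_cons, ih]
    cases hc : pvTruthy (D.get? k) && (D.get? k == some v) <;> simp

-- Membership of a pair in a nodup-keys dict's items is exactly a lookup hit.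
theorem pvContains_items (D : PySem.Dict String String) (hnd : D.keys.Nodup) (p : String × String) :
    D.items.contains p = (D.get? p.1 == some p.2) := by
  obtain ⟨k, v⟩ := p
  cases hg : D.get? k == some v
  · simp only [Bool.eq_false_iff] at hg ⊢
    intro hc
    have hm : (k, v) ∈ D.items := by simpa using hc
    exact hg (by simpa using (PySem.Dict.get?_eq_some_iff_mem_items D k v hnd).mpr hm)
  · have := PySem.Dict.mem_items_of_get?_eq_some D (eq_of_beq hg)
    simpa using this

-- ===== VERDICT (by name: the statement is the Claim_ definition above) =====
theorem tags_update_spec : Claim_equal_tags_update := by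
  intro old new _
  show tags_update old new = tags_update_alt old new
  unfold tags_update tags_update_alt
  set D := pvDictArg old with hD
  set N := pvDictArg new with hN
  have hnd : D.keys.Nodup := PySem.Dict.nodup_keys_ofList _
  have hmerge : (!(N.items.all (fun p => D.items.contains p)))
      = N.items.any (fun p => D.get? p.1 != some p.2) := by
    simp only [List.all_eq_not_any_not, Bool.not_not]
    refine List.any_congr rfl (fun p => ?_)
    show (!D.items.contains p) = (D.get? p.1 != some p.2)
    rw [pvContains_items D hnd p]
    rfl
  simp only [pvAltStep_foldl, pvDeleteLoop_eq_any, Bool.false_or, hmerge]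
  refine Prod.ext rfl (Prod.ext rfl ?_)
  simp only
  cases N.items.any (fun p => D.get? p.1 != some p.2)
  · simp only [Bool.not_false, Bool.true_and, Bool.false_or]
    by_cases hsz : D.size = N.size <;> simp [hsz]
  · simp
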